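-- pv_equiv track=rewrite | github.com/hdesai17/Digest_It | app/main.py | gluc_digest
-- ===== SOURCE A (Python) =====
-- def gluc_digest(protein_sequence):
--     peptides = []
--     # Split the sequence after each occurrence of E
--     cutsites = [0] + [i+1 for i, aa in enumerate(protein_sequence) if aa == 'E']
--     for i in range(len(cutsites)-1):
--         peptide = protein_sequence[cutsites[i]:cutsites[i+1]]
--         peptides.append(peptide)
--
--     # Add N-terminal and C-terminal peptides
--     if cutsites:
--         n_terminal_peptide = protein_sequence[:cutsites[0]]
--         peptides.insert(0, n_terminal_peptide)
--         c_terminal_peptide = protein_sequence[cutsites[-1]:]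
--         peptides.append(c_terminal_peptide)
--
--     return [peptide for peptide in peptides if peptide]
-- ===== SOURCE B (Python) =====
-- def gluc_digest(protein_sequence):
--     peptides = []
--     current = ''
--     for aa in protein_sequence:
--         current += aa
--         if aa == 'E':
--             peptides.append(current)
--             current = ''
--     if current:
--         peptides.append(current)
--     return peptides
-- ===== Notes on version B (the rewrite author's own statement) =====
-- stated objective: simpler
-- what changed: Replaced the two-phase cutsite-index construction (build a list of cut positions, then slice between consecutive indices, then insert/append terminal slices and filter out empties) by a single accumulating pass that grows the current peptide character by character and emits it at each 'E', so no index list, no slicing and no final filter are needed.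
import Mathlib
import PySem

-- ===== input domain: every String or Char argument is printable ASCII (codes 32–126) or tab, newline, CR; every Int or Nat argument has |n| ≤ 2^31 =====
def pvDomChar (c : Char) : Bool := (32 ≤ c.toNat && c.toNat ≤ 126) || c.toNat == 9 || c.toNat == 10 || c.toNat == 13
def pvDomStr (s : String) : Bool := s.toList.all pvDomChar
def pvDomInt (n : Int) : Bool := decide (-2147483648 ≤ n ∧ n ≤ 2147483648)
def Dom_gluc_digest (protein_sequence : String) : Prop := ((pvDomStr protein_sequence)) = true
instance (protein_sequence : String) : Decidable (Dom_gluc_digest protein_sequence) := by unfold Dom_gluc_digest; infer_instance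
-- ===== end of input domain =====

-- B replaces A's cutsite-index list + index-pair slicing + final empty-filter by one
-- accumulating pass that emits the growing peptide at each 'E' (simpler; same O(n) cost).

-- ===== PORT A =====
def gluc_digest (protein_sequence : String) : List String :=
  let l := protein_sequence.toList
  -- cutsites = [0] + [i+1 for i, aa in enumerate(protein_sequence) if aa == 'E']
  let cutsites : List Int :=
    [(0 : Int)] ++ (PySem.List.enumerate l 0).filterMap
      (fun p => if p.2 = 'E' then some (p.1 + 1) else none)
  -- for i in range(len(cutsites)-1): peptides.append(seq[cutsites[i]:cutsites[i+1]])
  let peptides : List (List Char) :=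
    (PySem.List.pyRange 0 ((cutsites.length : Int) - 1) 1).foldl
      (fun acc i =>
        acc ++ [PySem.List.slice l (some (PySem.List.pyGetD cutsites i 0))
                                   (some (PySem.List.pyGetD cutsites (i + 1) 0))]) []
  -- if cutsites: peptides.insert(0, seq[:cutsites[0]]); peptides.append(seq[cutsites[-1]:])
  let peptides : List (List Char) :=
    if cutsites ≠ [] then
      (PySem.List.slice l none (some (PySem.List.pyGetD cutsites 0 0)) :: peptides)
        ++ [PySem.List.slice l (some (PySem.List.pyGetD cutsites (-1) 0)) none]
    else peptides
  -- return [peptide for peptide in peptides if peptide]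
  (peptides.filter (fun p => ¬ p.isEmpty)).map (fun p => String.ofList p)

-- ===== PORT B =====
def gluc_digest_alt (protein_sequence : String) : List String :=
  let st := protein_sequence.toList.foldl
    (fun (st : List (List Char) × List Char) aa =>
      let current := st.2 ++ [aa]
      if aa = 'E' then (st.1 ++ [current], ([] : List Char)) else (st.1, current))
    ([], [])
  (if st.2.isEmpty then st.1 else st.1 ++ [st.2]).map (fun p => String.ofList p)

-- ===== PRECONDITION & SPEC =====
def Spec_gluc_digest (protein_sequence : String) (out : List String) : Prop := out = gluc_digest_alt protein_sequence
instance (protein_sequence : String) (out : List String) : Decidable (Spec_gluc_digest protein_sequence out) := by unfold Spec_gluc_digest; infer_instance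

-- ===== CLAIM (what is proved, stated in full; the proofs are below) =====
def Claim_equal_gluc_digest : Prop := ∀ (protein_sequence : String), Dom_gluc_digest protein_sequence → Spec_gluc_digest protein_sequence (gluc_digest protein_sequence)

-- ===== LEMMAS AND PROOFS =====

/-- cut positions (index+1 of every 'E'), indices starting at offset `k`. -/
def pvCuts : List Char → Nat → List Nat
  | [], _ => []
  | c :: t, k => (if c = 'E' then [k + 1] else []) ++ pvCuts t (k + 1)

/-- slices of `l` between consecutive bounds of `a :: cs`. -/
def pvSegs (l : List Char) : Nat → List Nat → List (List Char)
  | _, [] => []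
  | a, b :: t => List.take (b - a) (List.drop a l) :: pvSegs l b t

/-- A's cutsite comprehension computes `pvCuts`. -/
theorem pvCuts_eq (l : List Char) : ∀ (k : Nat),
    (PySem.List.enumerate l (k : Int)).filterMap
      (fun p => if p.2 = 'E' then some (p.1 + 1) else none)
    = (pvCuts l k).map (fun n : Nat => (n : Int)) := by
  induction l with
  | nil => intro k; simp [PySem.List.enumerate_nil, pvCuts]
  | cons c t ih =>
    intro k
    have h1 : ((k : Int) + 1) = ((k + 1 : Nat) : Int) := by push_cast; ring
    rw [PySem.List.enumerate_cons, List.filterMap_cons, h1, ih (k + 1)]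
    by_cases hc : c = 'E'
    · subst hc
      simp [pvCuts]
    · simp [pvCuts, hc]

theorem pvCuts_bounds (l : List Char) : ∀ (k : Nat), ∀ x ∈ pvCuts l k, k < x ∧ x ≤ k + l.length := by
  induction l with
  | nil => intro k x hx; simp [pvCuts] at hx
  | cons c t ih =>
    intro k x hx
    simp only [pvCuts, List.mem_append] at hx
    rcases hx with hx | hx
    · split at hx <;> simp at hx
      subst hx; simp only [List.length_cons]; omega
    · have := ih (k + 1) x hx
      simp only [List.length_cons]; omega

theorem pvCuts_append (l : List Char) (c : Char) : ∀ (k : Nat),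
    pvCuts (l ++ [c]) k = pvCuts l k ++ (if c = 'E' then [k + l.length + 1] else []) := by
  induction l with
  | nil => intro k; simp [pvCuts]
  | cons d t ih =>
    intro k
    simp only [List.cons_append, pvCuts, ih (k + 1), List.length_cons]
    split <;> split <;> simp <;> omega

theorem pvCuts_chain (l : List Char) : ∀ (k j : Nat), j ≤ k →
    List.IsChain (· < ·) (j :: pvCuts l k) := by
  induction l with
  | nil => intro k j _; simp [pvCuts]
  | cons c t ih =>
    intro k j hj
    by_cases hc : c = 'E'
    · simp only [pvCuts, hc, if_pos, List.singleton_append]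
      refine List.isChain_cons.mpr ⟨?_, ih (k + 1) (k + 1) le_rfl⟩
      intro y hy; simp at hy; omega
    · simp only [pvCuts, if_neg hc, List.nil_append]
      exact ih (k + 1) j (by omega)

/-- appending a character beyond every cut bound does not change the segments. -/
theorem pvSegs_stable (l : List Char) (c : Char) : ∀ (cs : List Nat) (a : Nat),
    (∀ x ∈ cs, x ≤ l.length) → a ≤ l.length →
    pvSegs (l ++ [c]) a cs = pvSegs l a cs := by
  intro cs
  induction cs with
  | nil => intro a _ _; simp [pvSegs]
  | cons b t ih =>
    intro a hb ha
    have hbl : b ≤ l.length := hb b (by simp)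
    have hdrop : List.drop a (l ++ [c]) = List.drop a l ++ [c] := List.drop_append_of_le_length ha
    have htake : List.take (b - a) (List.drop a l ++ [c]) = List.take (b - a) (List.drop a l) := by
      apply List.take_append_of_le_length
      simp [List.length_drop]; omega
    simp only [pvSegs, hdrop, htake]
    rw [ih b (fun x hx => hb x (by simp [hx])) hbl]

theorem pvSegs_snoc (l : List Char) (m : Nat) : ∀ (cs : List Nat) (a : Nat),
    pvSegs l a (cs ++ [m])
    = pvSegs l a cs ++ [List.take (m - cs.getLastD a) (List.drop (cs.getLastD a) l)] := by
  intro cs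
  induction cs with
  | nil => intro a; simp [pvSegs]
  | cons b t ih =>
    intro a
    simp only [List.cons_append, pvSegs, ih b, List.getLastD_cons]

/-- between strictly increasing in-range cut bounds every segment is nonempty,
so A's final filter keeps all of them. -/
theorem pvSegs_filter (l : List Char) : ∀ (cs : List Nat) (a : Nat),
    List.IsChain (· < ·) (a :: cs) → (∀ x ∈ cs, x ≤ l.length) →
    (pvSegs l a cs).filter (fun p => ¬ p.isEmpty) = pvSegs l a cs := by
  intro cs
  induction cs with
  | nil => intro a _ _; simp [pvSegs]
  | cons b t ih =>
    intro a hch hb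
    have hab : a < b := by
      have := (List.isChain_cons.mp hch).1 b
      simp at this; omega
    have hbl : b ≤ l.length := hb b (by simp)
    have hne : (List.take (b - a) (List.drop a l)).isEmpty = false := by
      simp [← List.length_eq_zero_iff, List.length_take, List.length_drop]
      omega
    simp only [pvSegs, List.filter_cons, hne]
    rw [ih b (List.isChain_cons.mp hch).2 (fun x hx => hb x (by simp [hx]))]
    simp

/-- A's inner loop (after `foldl_append_singleton_eq_map`) computes `pvSegs`. -/
theorem pv_loop_eq (l : List Char) : ∀ (cs : List Nat) (a : Nat),
    (PySem.List.pyRange 0 (cs.length : Int) 1).map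
      (fun i => PySem.List.slice l
        (some (PySem.List.pyGetD ((a :: cs).map (fun n : Nat => (n : Int))) i 0))
        (some (PySem.List.pyGetD ((a :: cs).map (fun n : Nat => (n : Int))) (i + 1) 0)))
    = pvSegs l a cs := by
  intro cs
  induction cs with
  | nil => intro a; simp [pvSegs]
  | cons b t ih =>
    intro a
    rw [List.length_cons, PySem.List.pyRange_zero_nat, List.range_succ_eq_map,
        List.map_cons, List.map_map]
    simp only [List.map_cons]
    congr 1
    · simp only [Function.comp_apply]
      rw [Nat.cast_zero, PySem.List.pyGetD_zero_cons, zero_add,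
          show (1 : Int) = ((1 : Nat) : Int) from rfl, PySem.List.pyGetD_natCast]
      simp only [List.getD, List.getElem?_cons_succ, List.getElem?_cons_zero, Option.getD_some]
      rw [PySem.List.slice_natCast]
    · rw [← ih b, PySem.List.pyRange_zero_nat, List.map_map, List.map_map]
      apply List.map_congr_left
      intro k _
      simp only [Function.comp_apply, List.map_cons]
      rw [show ((Nat.succ k : Nat) : Int) = ((k + 1 : Nat) : Int) from rfl,
          show (((k + 1 : Nat) : Int) + 1) = ((k + 2 : Nat) : Int) by push_cast; ring,
          show (((k : Nat) : Int) + 1) = ((k + 1 : Nat) : Int) by push_cast; ring,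
          PySem.List.pyGetD_natCast, PySem.List.pyGetD_natCast,
          PySem.List.pyGetD_natCast, PySem.List.pyGetD_natCast]
      simp [List.getD]

/-- the invariant of B's fold: the accumulated peptides are the inner segments and
the current buffer is the suffix after the last cut. -/
theorem pv_fold_inv (l : List Char) :
    l.foldl
      (fun (st : List (List Char) × List Char) aa =>
        let current := st.2 ++ [aa]
        if aa = 'E' then (st.1 ++ [current], ([] : List Char)) else (st.1, current))
      ([], [])
    = (pvSegs l 0 (pvCuts l 0), l.drop ((pvCuts l 0).getLastD 0)) := by
  induction l using List.reverseRecOn with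
  | nil => simp [pvCuts, pvSegs]
  | append_singleton l c ih =>
    rw [List.foldl_append, ih, List.foldl_cons, List.foldl_nil]
    have hlast_le : (pvCuts l 0).getLastD 0 ≤ l.length := by
      rcases h : pvCuts l 0 with _ | ⟨x, t⟩
      · simp
      · have hmem : (x :: t).getLastD 0 ∈ (0 : Nat) :: x :: t := List.getLastD_mem_cons
        have hE : (pvCuts l 0).getLastD 0 = (x :: t).getLastD 0 := by rw [h]
        rcases List.mem_cons.mp hmem with h0 | hm
        · omega
        · have := pvCuts_bounds l 0 _ (h ▸ hm)
          omega
    have hdrop : List.drop ((pvCuts l 0).getLastD 0) (l ++ [c])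
        = List.drop ((pvCuts l 0).getLastD 0) l ++ [c] :=
      List.drop_append_of_le_length hlast_le
    have hbounds : ∀ x ∈ pvCuts l 0, x ≤ l.length := fun x hx => by
      have := (pvCuts_bounds l 0 x hx).2; omega
    by_cases hc : c = 'E'
    · subst hc
      have hcut : pvCuts (l ++ ['E']) 0 = pvCuts l 0 ++ [l.length + 1] := by
        rw [pvCuts_append]; norm_num
      have htake2 : List.take (l.length + 1 - (pvCuts l 0).getLastD 0)
          (List.drop ((pvCuts l 0).getLastD 0) l ++ ['E'])
          = List.drop ((pvCuts l 0).getLastD 0) l ++ ['E'] := by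
        apply List.take_of_length_le
        simp only [List.length_append, List.length_drop, List.length_cons, List.length_nil]
        omega
      have hnil : List.drop (l.length + 1) (l ++ ['E']) = [] :=
        List.drop_eq_nil_of_le (by simp)
      rw [hcut, List.getLastD_concat, pvSegs_snoc,
          pvSegs_stable l 'E' _ 0 hbounds (by omega), hdrop, htake2, hnil]
      simp
    · simp only [if_neg hc]
      rw [pvCuts_append l c 0]
      simp only [if_neg hc, List.append_nil]
      exact Prod.ext (pvSegs_stable l c _ 0 hbounds (by omega)).symm hdrop.symm

/-- the two ports agree on every string. -/
theorem pv_main (s : String) : gluc_digest s = gluc_digest_alt s := by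
  have hfilter : ∀ x ∈ pvCuts s.toList 0, x ≤ s.toList.length :=
    fun x hx => by have := (pvCuts_bounds s.toList 0 x hx).2; omega
  have hcuts : ([(0 : Int)] ++ (PySem.List.enumerate s.toList 0).filterMap
      (fun p => if p.2 = 'E' then some (p.1 + 1) else none))
      = ((0 :: pvCuts s.toList 0).map (fun n : Nat => (n : Int))) := by
    rw [show (0 : Int) = ((0 : Nat) : Int) from rfl, pvCuts_eq s.toList 0]
    simp
  have hlen : ((((0 :: pvCuts s.toList 0).map (fun n : Nat => (n : Int))).length : Int) - 1)
      = (((pvCuts s.toList 0).length : Nat) : Int) := by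
    simp
  have h0 : PySem.List.pyGetD ((0 :: pvCuts s.toList 0).map (fun n : Nat => (n : Int))) 0 0 = 0 := by
    rw [List.map_cons, PySem.List.pyGetD_zero_cons]
    norm_num
  have hneg : PySem.List.pyGetD ((0 :: pvCuts s.toList 0).map (fun n : Nat => (n : Int))) (-1) 0
      = (((pvCuts s.toList 0).getLastD 0 : Nat) : Int) := by
    rw [PySem.List.pyGetD_neg_one _ _ (by simp), List.getLast_map, List.getLast_eq_getLastD]
  simp only [gluc_digest, gluc_digest_alt]
  rw [pv_fold_inv, hcuts, PySem.List.foldl_append_singleton_eq_map, hlen,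
      pv_loop_eq s.toList (pvCuts s.toList 0) 0,
      if_pos (by simp : ((0 :: pvCuts s.toList 0).map (fun n : Nat => (n : Int))) ≠ []),
      h0, hneg, PySem.List.slice_from_natCast,
      PySem.List.slice_to s.toList (by norm_num : (0 : Int) ≤ 0)]
  simp only [Int.toNat_zero, List.take_zero, List.nil_append]
  rw [show ((([] : List Char) :: pvSegs s.toList 0 (pvCuts s.toList 0))
        ++ [List.drop ((pvCuts s.toList 0).getLastD 0) s.toList])
      = ([] : List Char) :: (pvSegs s.toList 0 (pvCuts s.toList 0)
        ++ [List.drop ((pvCuts s.toList 0).getLastD 0) s.toList]) from rfl,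
      List.filter_cons, List.filter_append,
      pvSegs_filter s.toList (pvCuts s.toList 0) 0 (pvCuts_chain s.toList 0 0 le_rfl) hfilter]
  by_cases hemp : List.drop ((pvCuts s.toList 0).getLastD 0) s.toList = []
  · rw [hemp]
    simp
  · have hf : (List.drop ((pvCuts s.toList 0).getLastD 0) s.toList).isEmpty = false := by
      simpa [List.isEmpty_iff] using hemp
    simp only [hf, List.filter_cons, List.filter_nil, List.isEmpty_nil, Bool.false_eq_true,
      if_false, decide_not, Bool.not_true, decide_true, List.map_append]
    rfl

-- ===== VERDICT (by name: the statement is the Claim_ definition above) =====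
theorem gluc_digest_spec : Claim_equal_gluc_digest := by
  intro s _
  unfold Spec_gluc_digest
  exact pv_main s
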